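-- pv_equiv track=rewrite | github.com/ducklingen/AoC21 | helpers/AoCHelper.py | split_lines_into_chunks
-- ===== SOURCE A (Python) =====
-- def split_lines_into_chunks(lines, delimiters):
--     chuncks = []
--     chunk = []
--
--     for l in lines:
--         if l in delimiters:
--             chuncks.append(chunk)
--             chunk = []
--         else:
--             chunk.append(l)
--
--     chuncks.append(chunk)
--
--     return chuncks
-- ===== SOURCE B (Python) =====
-- def split_lines_into_chunks(lines, delimiters):
--     cuts = [i for i, l in enumerate(lines) if l in delimiters]
--     chunks = []
--     start = 0
--     for i in cuts:
--         chunks.append(lines[start:i])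
--         start = i + 1
--     chunks.append(lines[start:])
--     return chunks
-- ===== Notes on version B (the rewrite author's own statement) =====
-- stated objective: alternative
-- what changed: Replaced A's single-pass chunks/current-chunk accumulator by an index-table-plus-slicing scheme: first collect the indices of delimiter lines, then cut the list into slices between consecutive cut indices.
import Mathlib
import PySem

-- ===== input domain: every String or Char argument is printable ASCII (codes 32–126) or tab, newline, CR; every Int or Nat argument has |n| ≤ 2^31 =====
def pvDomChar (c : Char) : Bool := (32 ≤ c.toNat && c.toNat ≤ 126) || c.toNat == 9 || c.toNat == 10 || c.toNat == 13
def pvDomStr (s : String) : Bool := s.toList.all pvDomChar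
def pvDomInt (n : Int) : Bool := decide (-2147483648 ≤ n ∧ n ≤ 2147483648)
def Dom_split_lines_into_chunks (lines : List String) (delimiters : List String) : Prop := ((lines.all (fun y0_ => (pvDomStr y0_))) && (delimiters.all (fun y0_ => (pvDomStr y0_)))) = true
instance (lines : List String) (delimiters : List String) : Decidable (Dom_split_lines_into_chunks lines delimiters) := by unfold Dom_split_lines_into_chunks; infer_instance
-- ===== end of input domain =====

-- B replaces A's incremental chunk accumulator by a delimiter-index table plus slicing (alternative decomposition, same cost).

-- ===== PORT A =====
-- A: one forward pass; state = (chuncks so far, current chunk); the current chunk is appended once more at the end.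
def split_lines_into_chunks (lines : List String) (delimiters : List String) : List (List String) :=
  let st := lines.foldl
    (fun (st : List (List String) × List String) l =>
      if l ∈ delimiters then (st.1 ++ [st.2], []) else (st.1, st.2 ++ [l]))
    ([], [])
  st.1 ++ [st.2]

-- ===== PORT B =====
-- B: collect the indices of delimiter lines, then cut `lines` into slices between consecutive cut indices.
def split_lines_into_chunks_alt (lines : List String) (delimiters : List String) : List (List String) :=
  let cuts := ((PySem.List.enumerate lines).filter (fun p => p.2 ∈ delimiters)).map (·.1)
  let st := cuts.foldl
    (fun (st : List (List String) × Int) i =>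
      (st.1 ++ [PySem.List.slice lines (some st.2) (some i)], i + 1))
    ([], 0)
  st.1 ++ [PySem.List.slice lines (some st.2) none]

-- ===== PRECONDITION & SPEC =====
def Spec_split_lines_into_chunks (lines : List String) (delimiters : List String) (out : List (List String)) : Prop := out = split_lines_into_chunks_alt lines delimiters
instance (lines : List String) (delimiters : List String) (out : List (List String)) : Decidable (Spec_split_lines_into_chunks lines delimiters out) := by unfold Spec_split_lines_into_chunks; infer_instance

-- ===== CLAIM (what is proved, stated in full; the proofs are below) =====
def Claim_equal_split_lines_into_chunks : Prop := ∀ (lines : List String) (delimiters : List String), Dom_split_lines_into_chunks lines delimiters → Spec_split_lines_into_chunks lines delimiters (split_lines_into_chunks lines delimiters)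

-- ===== LEMMAS AND PROOFS =====

-- Recursive reference: both ports are proved equal to this structural recursion.
def splitRec (delimiters : List String) : List String → List (List String)
  | [] => [[]]
  | l :: rest =>
    let t := splitRec delimiters rest
    if l ∈ delimiters then [] :: t else (l :: t.headD []) :: t.tail

theorem splitRec_ne_nil (delimiters lines : List String) :
    splitRec delimiters lines ≠ [] := by
  cases lines with
  | nil => simp [splitRec]
  | cons h t => simp only [splitRec]; split <;> simp

-- A-side loop invariant: running A's fold from state (cs, ch) and finishing yields cs
-- followed by splitRec's result with ch prepended to its first chunk.
theorem afold (delimiters : List String) : ∀ (lines : List String)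
    (cs : List (List String)) (ch : List String),
    (let st := lines.foldl
        (fun (st : List (List String) × List String) l =>
          if l ∈ delimiters then (st.1 ++ [st.2], []) else (st.1, st.2 ++ [l]))
        (cs, ch)
     st.1 ++ [st.2])
      = cs ++ (ch ++ (splitRec delimiters lines).headD [])
              :: (splitRec delimiters lines).tail := by
  intro lines
  induction lines with
  | nil => intro cs ch; simp [splitRec]
  | cons l rest ih =>
    intro cs ch
    simp only [List.foldl_cons, splitRec]
    by_cases h : l ∈ delimiters
    · simp only [h, if_pos]
      rw [ih (cs ++ [ch]) []]
      rcases hr : splitRec delimiters rest with _ | ⟨c, t⟩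
      · exact absurd hr (splitRec_ne_nil delimiters rest)
      · simp
    · simp only [h, if_neg, not_false_iff]
      rw [ih cs (ch ++ [l])]
      simp

-- B-side loop invariant: processing the cut indices of the suffix `xs = lines.drop s`
-- (enumerated from s) with pending slice start `start ≤ s` yields cs followed by
-- splitRec of the suffix with the pending slice lines[start:s] prepended to its first chunk.
theorem bfold (delimiters lines : List String) : ∀ (xs : List String)
    (s start : Nat) (cs : List (List String)),
    lines.drop s = xs → start ≤ s →
    (let st := (((PySem.List.enumerate xs (s : Int)).filter
          (fun p => p.2 ∈ delimiters)).map (·.1)).foldl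
        (fun (st : List (List String) × Int) i =>
          (st.1 ++ [PySem.List.slice lines (some st.2) (some i)], i + 1))
        (cs, (start : Int))
     st.1 ++ [PySem.List.slice lines (some st.2) none])
      = cs ++ (PySem.List.slice lines (some (start : Int)) (some (s : Int))
                ++ (splitRec delimiters xs).headD [])
              :: (splitRec delimiters xs).tail := by
  intro xs
  induction xs with
  | nil =>
    intro s start cs hdrop hle
    simp only [PySem.List.enumerate_nil, List.filter_nil, List.map_nil, List.foldl_nil,
      splitRec, PySem.List.slice_from_natCast, PySem.List.slice_natCast]
    have hlen : lines.length ≤ s := by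
      by_contra hlt
      push Not at hlt
      have := List.drop_eq_nil_iff.mp hdrop
      omega
    rw [List.take_of_length_le (by simp; omega)]
    simp
  | cons l rest ih =>
    intro s start cs hdrop hle
    have hget : lines[s]? = some l := by
      have : (lines.drop s)[0]? = some l := by rw [hdrop]; rfl
      simpa using this
    have hdrop' : lines.drop (s + 1) = rest := by
      have h1 := congrArg (List.drop 1) hdrop
      simpa [List.drop_drop, Nat.add_comm] using h1
    simp only [PySem.List.enumerate_cons, List.filter_cons, splitRec]
    by_cases h : l ∈ delimiters
    · simp only [h, decide_true, if_true, List.map_cons, List.foldl_cons]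
      have hcast : (s : Int) + 1 = ((s + 1 : Nat) : Int) := by push_cast; ring
      rw [hcast, ih (s + 1) (s + 1) (cs ++ [PySem.List.slice lines (some (start : Int)) (some (s : Int))]) hdrop' le_rfl]
      rcases hr : splitRec delimiters rest with _ | ⟨c, t⟩
      · exact absurd hr (splitRec_ne_nil delimiters rest)
      · have hz : PySem.List.slice lines (some ((s : Int) + 1)) (some ((s : Int) + 1)) = [] := by
          rw [hcast, PySem.List.slice_natCast]; simp
        simp [hz]
    · simp only [h, decide_false, Bool.false_eq_true, if_false]
      have hcast : (s : Int) + 1 = ((s + 1 : Nat) : Int) := by push_cast; ring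
      rw [hcast, ih (s + 1) start cs hdrop' (by omega)]
      have hslice : PySem.List.slice lines (some (start : Int)) (some ((s + 1 : Nat) : Int))
          = PySem.List.slice lines (some (start : Int)) (some (s : Int)) ++ [l] := by
        rw [PySem.List.slice_natCast, PySem.List.slice_natCast]
        have hk : s + 1 - start = (s - start) + 1 := by omega
        rw [hk, List.take_add_one]
        congr 1
        rw [List.getElem?_drop, Nat.add_sub_cancel' hle, hget]
        rfl
      rw [hslice]
      simp
    
-- ===== VERDICT (by name: the statement is the Claim_ definition above) =====
theorem split_lines_into_chunks_spec : Claim_equal_split_lines_into_chunks := by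
  intro lines delimiters _
  show split_lines_into_chunks lines delimiters = split_lines_into_chunks_alt lines delimiters
  unfold split_lines_into_chunks split_lines_into_chunks_alt
  rw [afold delimiters lines [] []]
  have h0 : ((0 : Nat) : Int) = (0 : Int) := rfl
  have := bfold delimiters lines lines 0 0 [] (by simp) le_rfl
  simp only [Nat.cast_zero] at this
  rw [this]
  simp
  simpa using PySem.List.slice_to_natCast lines 0
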